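-- pv_equiv track=rewrite | github.com/lightdrk/leetcode | greedy/maxSubArray.py | idmx
-- ===== SOURCE A (Python) =====
-- def idmx(nums: list[int]) ->tuple[int,int]:
--     '''
--         this gives us sub array too
--     '''
--     mx = ans = nums[0]
--     start = end = s = 0
--     for i,num in enumerate(nums[1:],1):
--         ans+=num
--         if ans < num:
--             ans = num
--             s = i
--
--         if mx < ans:
--             mx = ans
--             start = s
--             end = i
--     return (start, end)
-- ===== SOURCE B (Python) =====
-- def idmx(nums: list[int]) -> tuple[int, int]:
--     # prefix-sum formulation: best subarray ending at e is the prefix sum at e+1 minus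
--     # the minimum earlier prefix sum; track earliest argmin and strict improvements
--     prefix = [0]
--     acc = 0
--     for x in nums:
--         acc += x
--         prefix.append(acc)
--     mx = nums[0]
--     start = end = min_idx = 0
--     min_p = 0
--     for e in range(1, len(nums)):
--         if prefix[e] < min_p:
--             min_p = prefix[e]
--             min_idx = e
--         cand = prefix[e + 1] - min_p
--         if cand > mx:
--             mx = cand
--             start = min_idx
--             end = e
--     return (start, end)
-- ===== Notes on version B (the rewrite author's own statement) =====
-- stated objective: alternative
-- what changed: Replaced Kadane's running-sum-with-reset by a precomputed prefix-sum array scanned once while tracking the earliest minimum prefix, the candidate being the prefix at e+1 minus that minimum; same indices and tie-breaking.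
import Mathlib
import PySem

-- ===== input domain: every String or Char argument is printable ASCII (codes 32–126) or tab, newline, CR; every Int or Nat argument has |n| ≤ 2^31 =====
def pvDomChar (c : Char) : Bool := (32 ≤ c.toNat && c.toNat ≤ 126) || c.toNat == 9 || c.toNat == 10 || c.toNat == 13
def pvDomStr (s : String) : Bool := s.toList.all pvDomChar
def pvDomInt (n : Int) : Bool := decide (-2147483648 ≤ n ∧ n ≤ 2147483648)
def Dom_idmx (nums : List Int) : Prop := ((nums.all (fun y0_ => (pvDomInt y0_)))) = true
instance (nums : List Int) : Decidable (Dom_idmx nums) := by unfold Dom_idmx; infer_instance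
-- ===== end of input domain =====

-- B replaces Kadane's reset-on-negative running sum by a prefix-sum array scanned once
-- with an earliest-argmin of the prefix minimum (alternative decomposition, same cost).

-- ===== PORT A =====
-- loop state (mx, ans, start, end, s)
def stepA (st : Int × Int × Int × Int × Int) (p : Int × Int) : Int × Int × Int × Int × Int :=
  match st, p with
  | (mx, ans, start, en, s), (i, num) =>
    let ans := ans + num
    let (ans, s) := if ans < num then (num, i) else (ans, s)
    if mx < ans then (ans, ans, s, i, s) else (mx, ans, start, en, s)

def idmx (nums : List Int) : Int × Int :=
  match nums with
  | [] => (0, 0)  -- Python raises IndexError (first-element access); excluded by Pre_idmx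
  | n0 :: rest =>
    let st := (PySem.List.enumerate rest 1).foldl stepA (n0, n0, 0, 0, 0)
    (st.2.2.1, st.2.2.2.1)

-- ===== PORT B =====
def prefixSums (nums : List Int) : List Int :=
  (nums.foldl (fun (st : List Int × Int) x => (st.1 ++ [st.2 + x], st.2 + x)) ([0], 0)).1

-- loop state (mx, start, end, minIdx, minP)
def stepB (P : List Int) (st : Int × Int × Int × Int × Int) (e : Int) : Int × Int × Int × Int × Int :=
  match st with
  | (mx, start, en, minIdx, minP) =>
    let (minP, minIdx) :=
      if PySem.List.pyGetD P e 0 < minP then (PySem.List.pyGetD P e 0, e) else (minP, minIdx)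
    let cand := PySem.List.pyGetD P (e + 1) 0 - minP
    if cand > mx then (cand, minIdx, e, minIdx, minP) else (mx, start, en, minIdx, minP)

def idmx_alt (nums : List Int) : Int × Int :=
  match nums with
  | [] => (0, 0)  -- Python raises IndexError (first-element access); excluded by Pre_idmx
  | n0 :: _ =>
    let P := prefixSums nums
    let st := (PySem.List.pyRange 1 (nums.length : Int) 1).foldl (stepB P) (n0, 0, 0, 0, 0)
    (st.2.1, st.2.2.1)

-- ===== PRECONDITION & SPEC =====
--
def Pre_idmx (nums : List Int) : Prop := nums ≠ []
instance (nums : List Int) : Decidable (Pre_idmx nums) := by unfold Pre_idmx; infer_instance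
def pvWitness_idmx : List Int := [2, -3, 4, -1, 2]

def Spec_idmx (nums : List Int) (out : Int × Int) : Prop := out = idmx_alt nums
instance (nums : List Int) (out : Int × Int) : Decidable (Spec_idmx nums out) := by unfold Spec_idmx; infer_instance

-- ===== CLAIM (what is proved, stated in full; the proofs are below) =====
def Claim_equal_idmx : Prop := ∀ (nums : List Int), Dom_idmx nums → Pre_idmx nums → Spec_idmx nums (idmx nums)

-- ===== LEMMAS AND PROOFS =====

theorem pref_aux : ∀ (ys : List Int) (L : List Int) (a : Int),
    ys.foldl (fun (st : List Int × Int) x => (st.1 ++ [st.2 + x], st.2 + x)) (L, a)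
      = (L ++ (List.range ys.length).map (fun k => a + ((ys.take (k+1)).sum)), a + ys.sum) := by
  intro ys
  induction ys with
  | nil => intro L a; simp
  | cons x t ih =>
    intro L a
    simp only [List.foldl_cons]
    rw [ih]
    refine Prod.ext ?_ (by simp; ring)
    simp only [List.length_cons, List.range_succ_eq_map, List.map_cons, List.map_map,
      List.take_succ_cons, List.sum_cons]
    simp [List.append_assoc]
    ring_nf
    simp

theorem prefixSums_eq (nums : List Int) :
    prefixSums nums = 0 :: (List.range nums.length).map (fun k => ((nums.take (k+1)).sum)) := by
  unfold prefixSums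
  rw [pref_aux]
  simp

theorem prefixSums_get (nums : List Int) (k : Nat) (hk : k ≤ nums.length) :
    PySem.List.pyGetD (prefixSums nums) (k : Int) 0 = (nums.take k).sum := by
  rw [prefixSums_eq]
  rw [PySem.List.pyGetD_natCast]
  cases k with
  | zero => simp
  | succ j =>
    have hj : j < nums.length := by omega
    simp [List.getD, hj]

theorem loop_sim (nums : List Int) :
    ∀ (m i : Nat), m = nums.length - i → 1 ≤ i → i ≤ nums.length →
    ∀ (mx st en s minP : Int),
    (let A' := (PySem.List.enumerate (nums.drop i) (i : Int)).foldl stepA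
        (mx, (nums.take i).sum - minP, st, en, s)
     let B' := (PySem.List.pyRange (i : Int) (nums.length : Int) 1).foldl
        (stepB (prefixSums nums)) (mx, st, en, s, minP)
     (A'.2.2.1, A'.2.2.2.1) = (B'.2.1, B'.2.2.1)) := by
  intro m
  induction m with
  | zero =>
    intro i hm h1 hin mx st en s minP
    have hi : i = nums.length := by omega
    simp only [hi, List.drop_length, PySem.List.enumerate_nil, List.foldl_nil,
      PySem.List.pyRange_one_eq_nil (le_refl _)]
  | succ m ih =>
    intro i hm h1 hin mx st en s minP
    have hlt : i < nums.length := by omega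
    have hd : nums.drop i = nums[i] :: nums.drop (i + 1) := List.drop_eq_getElem_cons hlt
    have hr : PySem.List.pyRange (i : Int) (nums.length : Int) 1
        = (i : Int) :: PySem.List.pyRange ((i : Int) + 1) (nums.length : Int) 1 :=
      PySem.List.pyRange_one_cons (by exact_mod_cast hlt)
    simp only [hd, hr, PySem.List.enumerate_cons, List.foldl_cons]
    have hPi : PySem.List.pyGetD (prefixSums nums) (i : Int) 0 = (nums.take i).sum :=
      prefixSums_get nums i (by omega)
    have hPi1 : PySem.List.pyGetD (prefixSums nums) ((i : Int) + 1) 0 = (nums.take (i+1)).sum := by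
      have := prefixSums_get nums (i+1) (by omega)
      push_cast at this ⊢
      exact this
    have hT : (nums.take (i+1)).sum = (nums.take i).sum + nums[i] := by
      rw [List.sum_take_succ _ _ hlt]
    simp only [stepA, stepB, hPi, hPi1]
    by_cases hc : (nums.take i).sum - minP + nums[i] < nums[i]
    · have hc' : (nums.take i).sum < minP := by omega
      simp only [if_pos hc, if_pos hc']
      by_cases hc2 : mx < nums[i]
      · have hc2' : (nums.take (i+1)).sum - (nums.take i).sum > mx := by omega
        simp only [if_pos hc2, gt_iff_lt, if_pos (by omega : mx < (nums.take (i+1)).sum - (nums.take i).sum)]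
        have : nums[i] = (nums.take (i+1)).sum - (nums.take i).sum := by omega
        rw [this]
        have := ih (i+1) (by omega) (by omega) (by omega)
          ((nums.take (i+1)).sum - (nums.take i).sum) (i:Int) (i:Int) (i:Int) ((nums.take i).sum)
        push_cast at this ⊢
        convert this using 3
      · simp only [if_neg hc2, gt_iff_lt,
          if_neg (by omega : ¬ mx < (nums.take (i+1)).sum - (nums.take i).sum)]
        have h2 : nums[i] = (nums.take (i+1)).sum - (nums.take i).sum := by omega
        rw [h2]
        have := ih (i+1) (by omega) (by omega) (by omega)
          mx st en (i:Int) ((nums.take i).sum)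
        push_cast at this ⊢
        convert this using 3
    · have hc' : ¬ (nums.take i).sum < minP := by omega
      simp only [if_neg hc, if_neg hc']
      by_cases hc2 : mx < (nums.take i).sum - minP + nums[i]
      · simp only [if_pos hc2, gt_iff_lt,
          if_pos (by omega : mx < (nums.take (i+1)).sum - minP)]
        have h2 : (nums.take i).sum - minP + nums[i] = (nums.take (i+1)).sum - minP := by omega
        rw [h2]
        have := ih (i+1) (by omega) (by omega) (by omega)
          ((nums.take (i+1)).sum - minP) s (i:Int) s minP
        push_cast at this ⊢
        convert this using 3
      · simp only [if_neg hc2, gt_iff_lt,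
          if_neg (by omega : ¬ mx < (nums.take (i+1)).sum - minP)]
        have h2 : (nums.take i).sum - minP + nums[i] = (nums.take (i+1)).sum - minP := by omega
        rw [h2]
        have := ih (i+1) (by omega) (by omega) (by omega) mx st en s minP
        push_cast at this ⊢
        convert this using 3

-- ===== VERDICT (by name: the statement is the Claim_ definition above) =====
theorem idmx_spec : Claim_equal_idmx := by
  intro nums _ hpre
  unfold Spec_idmx
  match nums, hpre with
  | n0 :: rest, _ =>
    have h := loop_sim (n0 :: rest) rest.length 1 (by simp) (le_refl 1) (by simp) n0 0 0 0 0
    simp only [idmx, idmx_alt]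
    simpa using h
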